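-- pv_equiv track=rewrite | github.com/Salinporn/KMITL | Algorithm-Design-and-Analysis/practice/number_picking.py | number_picking
-- ===== SOURCE A (Python) =====
-- def number_picking(numbers, pick=None):
--     """number_picking"""
--     if len(numbers) == 0:
--         return True
--     if pick == None or abs(numbers[0]-pick) <= 9:
--         if number_picking(numbers[1:], numbers[0]):
--             return True
--     if pick == None or abs(numbers[-1]-pick) <= 9:
--         if number_picking(numbers[:-1], numbers[-1]):
--             return True
--     return False
-- ===== SOURCE B (Python) =====
-- def number_picking(numbers, pick=None):
--     """number_picking (memoized interval DP over (i, j, pick) states)"""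
--     n = len(numbers)
--     memo = {}
--
--     def go(i, j, pick):
--         if i == j:
--             return True
--         key = (i, j, pick)
--         if key in memo:
--             return memo[key]
--         res = ((pick is None or abs(numbers[i] - pick) <= 9) and go(i + 1, j, numbers[i])) or \
--               ((pick is None or abs(numbers[j - 1] - pick) <= 9) and go(i, j - 1, numbers[j - 1]))
--         memo[key] = res
--         return res
--
--     return go(0, n, pick)
-- ===== Notes on version B (the rewrite author's own statement) =====
-- stated objective: faster
-- what changed: Replaced A's exponential recursion on list slices (numbers[1:], numbers[:-1]) with a memoized top-down DP over (left, right, last-pick) index states, so each interval state is solved once.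
import Mathlib
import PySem

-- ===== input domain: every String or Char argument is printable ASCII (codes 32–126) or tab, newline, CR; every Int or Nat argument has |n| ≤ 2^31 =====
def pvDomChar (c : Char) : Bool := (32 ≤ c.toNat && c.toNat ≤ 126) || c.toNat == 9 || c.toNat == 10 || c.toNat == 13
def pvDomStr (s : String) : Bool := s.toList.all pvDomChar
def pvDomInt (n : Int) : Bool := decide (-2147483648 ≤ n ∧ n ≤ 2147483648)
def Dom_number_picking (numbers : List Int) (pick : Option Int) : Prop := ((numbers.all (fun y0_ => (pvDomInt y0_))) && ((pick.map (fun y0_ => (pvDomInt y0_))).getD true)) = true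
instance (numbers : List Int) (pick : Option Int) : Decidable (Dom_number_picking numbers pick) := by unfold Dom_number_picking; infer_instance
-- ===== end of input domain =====

-- B replaces A's exponential recursion over list slices with a memoized interval DP over (i, j, pick) states (objective: faster, asymptotic).

-- shared transliteration of Python's "pick == None or abs(x - pick) <= 9"
def pickOk (pick : Option Int) (x : Int) : Bool :=
  match pick with
  | none => true
  | some p => decide ((x - p).natAbs ≤ 9)

-- ===== PORT A =====
def number_picking (numbers : List Int) (pick : Option Int) : Bool :=
  match numbers with
  | [] => true
  | h :: t =>
      (pickOk pick h && number_picking t (some h)) ||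
      (pickOk pick ((h :: t).getLast (List.cons_ne_nil h t)) &&
        number_picking ((h :: t).dropLast) (some ((h :: t).getLast (List.cons_ne_nil h t))))
termination_by numbers.length
decreasing_by
  · simp
  · simp [List.length_dropLast]

-- ===== PORT B =====
-- go(i, j, pick) with a memo dict threaded through; fuel decreases at each call (fuel ≥ j - i at the top call, so the 0-fuel branch is never taken)
def goB (nums : List Int) : Nat → Nat → Nat → Option Int → PySem.Dict (Nat × Nat × Option Int) Bool → Bool × PySem.Dict (Nat × Nat × Option Int) Bool
  | fuel, i, j, pick, memo =>
    if i = j then (true, memo)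
    else
      match memo.get? (i, j, pick) with
      | some v => (v, memo)
      | none =>
        match fuel with
        | 0 => (false, memo)
        | fuel + 1 =>
          let x := nums.getD i 0
          let (r1, m1) :=
            if pickOk pick x then goB nums fuel (i + 1) j (some x) memo else (false, memo)
          if r1 then (true, m1.insert (i, j, pick) true)
          else
            let y := nums.getD (j - 1) 0
            let (r2, m2) :=
              if pickOk pick y then goB nums fuel i (j - 1) (some y) m1 else (false, m1)
            (r2, m2.insert (i, j, pick) r2)

def number_picking_alt (numbers : List Int) (pick : Option Int) : Bool :=
  (goB numbers numbers.length 0 numbers.length pick PySem.Dict.empty).1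

-- ===== PRECONDITION & SPEC =====
def Spec_number_picking (numbers : List Int) (pick : Option Int) (out : Bool) : Prop := out = number_picking_alt numbers pick
instance (numbers : List Int) (pick : Option Int) (out : Bool) : Decidable (Spec_number_picking numbers pick out) := by unfold Spec_number_picking; infer_instance

-- ===== CLAIM (what is proved, stated in full; the proofs are below) =====
def Claim_equal_number_picking : Prop := ∀ (numbers : List Int) (pick : Option Int), Dom_number_picking numbers pick → Spec_number_picking numbers pick (number_picking numbers pick)

-- ===== LEMMAS AND PROOFS =====

-- the contiguous slice numbers[i:j]
def slc (nums : List Int) (i j : Nat) : List Int := (nums.drop i).take (j - i)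

-- memo invariant: every stored value is A's answer on the corresponding slice
def MemoInv (nums : List Int) (memo : PySem.Dict (Nat × Nat × Option Int) Bool) : Prop :=
  ∀ i j pick v, memo.get? (i, j, pick) = some v → v = number_picking (slc nums i j) pick

lemma slc_empty (nums : List Int) (i j : Nat) (h : j ≤ i) : slc nums i j = [] := by
  simp [slc, Nat.sub_eq_zero_of_le h]

lemma length_slc (nums : List Int) (i j : Nat) (_hij : i ≤ j) (hj : j ≤ nums.length) :
    (slc nums i j).length = j - i := by
  simp [slc]; omega

lemma slc_cons (nums : List Int) (i j : Nat) (hij : i < j) (hj : j ≤ nums.length) :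
    slc nums i j = nums.getD i 0 :: slc nums (i + 1) j := by
  have hi : i < nums.length := lt_of_lt_of_le hij hj
  have hd : nums.drop i = nums[i] :: nums.drop (i + 1) := List.drop_eq_getElem_cons hi
  have hji : j - i = (j - (i + 1)) + 1 := by omega
  unfold slc
  rw [hd, hji, List.take_succ_cons]
  congr 1
  rw [List.getD_eq_getElem?_getD, List.getElem?_eq_getElem hi]
  rfl

lemma slc_getLast? (nums : List Int) (i j : Nat) (hij : i < j) (hj : j ≤ nums.length) :
    (slc nums i j).getLast? = some (nums.getD (j - 1) 0) := by
  have hlen : (slc nums i j).length = j - i := length_slc nums i j (le_of_lt hij) hj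
  have hj1 : j - 1 < nums.length := by omega
  rw [List.getLast?_eq_getElem?, hlen]
  unfold slc
  rw [List.getElem?_take_of_lt (by omega), List.getElem?_drop]
  have he : i + (j - i - 1) = j - 1 := by omega
  rw [he, List.getElem?_eq_getElem hj1, List.getD_eq_getElem?_getD, List.getElem?_eq_getElem hj1]
  rfl

lemma slc_dropLast (nums : List Int) (i j : Nat) (hij : i < j) (hj : j ≤ nums.length) :
    (slc nums i j).dropLast = slc nums i (j - 1) := by
  have hlen : (slc nums i j).length = j - i := length_slc nums i j (le_of_lt hij) hj
  rw [List.dropLast_eq_take, hlen]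
  simp [slc, List.take_take]
  congr 1
  omega

-- A unfolded on a nonempty slice
lemma number_picking_slc (nums : List Int) (i j : Nat) (pick : Option Int)
    (hij : i < j) (hj : j ≤ nums.length) :
    number_picking (slc nums i j) pick =
      ((pickOk pick (nums.getD i 0) && number_picking (slc nums (i + 1) j) (some (nums.getD i 0))) ||
       (pickOk pick (nums.getD (j - 1) 0) &&
         number_picking (slc nums i (j - 1)) (some (nums.getD (j - 1) 0)))) := by
  have hc := slc_cons nums i j hij hj
  conv_lhs => rw [hc, number_picking]
  have hL : (nums.getD i 0 :: slc nums (i + 1) j).getLast (List.cons_ne_nil _ _) =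
      nums.getD (j - 1) 0 := by
    have h1 := List.getLast?_eq_some_getLast (l := nums.getD i 0 :: slc nums (i + 1) j)
      (List.cons_ne_nil _ _)
    have h2 : (nums.getD i 0 :: slc nums (i + 1) j).getLast? = some (nums.getD (j - 1) 0) := by
      rw [← hc]; exact slc_getLast? nums i j hij hj
    rw [h2] at h1
    exact (Option.some.inj h1).symm
  have hD : (nums.getD i 0 :: slc nums (i + 1) j).dropLast = slc nums i (j - 1) := by
    rw [← hc]; exact slc_dropLast nums i j hij hj
  rw [hL, hD]

lemma goB_correct (nums : List Int) :
    ∀ fuel i j pick memo, i ≤ j → j ≤ nums.length → j - i ≤ fuel → MemoInv nums memo →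
      (goB nums fuel i j pick memo).1 = number_picking (slc nums i j) pick ∧
        MemoInv nums (goB nums fuel i j pick memo).2 := by
  intro fuel
  induction fuel with
  | zero =>
    intro i j pick memo hij hj hf hMemoInv
    have hji : i = j := by omega
    subst hji
    rw [goB]
    simp [slc_empty nums i i le_rfl, number_picking, hMemoInv]
  | succ f ih =>
    intro i j pick memo hij hj hf hMemoInv
    rw [goB]
    by_cases hie : i = j
    · subst hie
      simp [slc_empty nums i i le_rfl, number_picking, hMemoInv]
    · have hij' : i < j := lt_of_le_of_ne hij hie
      simp only [if_neg hie]
      cases hget : memo.get? (i, j, pick) with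
      | some v =>
        simp only []
        exact ⟨hMemoInv i j pick v hget, hMemoInv⟩
      | none =>
        simp only []
        have hA := number_picking_slc nums i j pick hij' hj
        set x := nums.getD i 0 with hx
        set y := nums.getD (j - 1) 0 with hy
        -- left branch
        have hleft : ∀ (m : _), MemoInv nums m →
            ((if pickOk pick x then goB nums f (i + 1) j (some x) m else (false, m)).1 =
              (pickOk pick x && number_picking (slc nums (i + 1) j) (some x)) ∧
             MemoInv nums (if pickOk pick x then goB nums f (i + 1) j (some x) m else (false, m)).2) := by
          intro m hm
          by_cases hc : pickOk pick x
          · simp only [hc, Bool.true_and]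
            exact ih (i + 1) j (some x) m (by omega) hj (by omega) hm
          · simp only [if_neg hc]
            simp at hc
            simp [hc, hm]
        have hright : ∀ (m : _), MemoInv nums m →
            ((if pickOk pick y then goB nums f i (j - 1) (some y) m else (false, m)).1 =
              (pickOk pick y && number_picking (slc nums i (j - 1)) (some y)) ∧
             MemoInv nums (if pickOk pick y then goB nums f i (j - 1) (some y) m else (false, m)).2) := by
          intro m hm
          by_cases hc : pickOk pick y
          · simp only [hc, Bool.true_and]
            exact ih i (j - 1) (some y) m (by omega) (by omega) (by omega) hm
          · simp only [if_neg hc]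
            simp at hc
            simp [hc, hm]
        obtain ⟨h1, hMemoInv1⟩ := hleft memo hMemoInv
        set p1 := (if pickOk pick x then goB nums f (i + 1) j (some x) memo else (false, memo)) with hp1
        obtain ⟨h2, hMemoInv2⟩ := hright p1.2 hMemoInv1
        set p2 := (if pickOk pick y then goB nums f i (j - 1) (some y) p1.2 else (false, p1.2)) with hp2
        -- insertion preserves MemoInv when the inserted value is A's answer on (i, j)
        have hins : ∀ (m : _) (b : Bool), MemoInv nums m → b = number_picking (slc nums i j) pick →
            MemoInv nums (m.insert (i, j, pick) b) := by
          intro m b hm hb i' j' pick' v hv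
          rw [PySem.Dict.get?_insert] at hv
          by_cases he : ((i', j', pick') : Nat × Nat × Option Int) = (i, j, pick)
          · rw [if_pos he] at hv
            cases hv
            have e1 : i' = i := congrArg (fun p => p.1) he
            have e2 : j' = j := congrArg (fun p => p.2.1) he
            have e3 : pick' = pick := congrArg (fun p => p.2.2) he
            subst e1; subst e2; subst e3
            exact hb
          · rw [if_neg he] at hv
            exact hm i' j' pick' v hv
        by_cases hr1 : p1.1 = true
        · refine ⟨?_, ?_⟩
          · simp [hr1, hA, ← h1]
          · have hgoal : (if p1.1 = true then (true, p1.2.insert (i, j, pick) true)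
                else (p2.1, p2.2.insert (i, j, pick) p2.1)).2 = p1.2.insert (i, j, pick) true := by
              simp [hr1]
            rw [hgoal]
            exact hins p1.2 true hMemoInv1 (by simp [hA, ← h1, hr1])
        · have hr1' : p1.1 = false := Bool.eq_false_iff.mpr hr1
          refine ⟨?_, ?_⟩
          · simp [hr1', hA, ← h1, ← h2]
          · have hgoal : (if p1.1 = true then (true, p1.2.insert (i, j, pick) true)
                else (p2.1, p2.2.insert (i, j, pick) p2.1)).2 = p2.2.insert (i, j, pick) p2.1 := by
              simp [hr1']
            rw [hgoal]
            exact hins p2.2 p2.1 hMemoInv2 (by simp [hA, ← h1, ← h2, hr1'])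

lemma slc_full (nums : List Int) : slc nums 0 nums.length = nums := by
  simp [slc]

-- ===== VERDICT (by name: the statement is the Claim_ definition above) =====
theorem number_picking_spec : Claim_equal_number_picking := by
  intro numbers pick _
  unfold Spec_number_picking number_picking_alt
  have hMemoInv : MemoInv numbers PySem.Dict.empty := by
    intro i j pick v hv
    simp [PySem.Dict.get?_empty] at hv
  have h := goB_correct numbers numbers.length 0 numbers.length pick PySem.Dict.empty
    (Nat.zero_le _) le_rfl (by omega) hMemoInv
  rw [h.1, slc_full]
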